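-- pv_equiv track=rewrite | github.com/xbresson/Long_Tailed_Learning_Requires_Feature_Learning | eval_formula_from_theorem7/simplex.py | solve_int_ineq
-- ===== SOURCE A (Python) =====
-- import math
--
-- def solve_int_ineq(a,b):
--     """
--     Find all the integer vectors x = [x_0, x_1, ..., x_{n-1}] that satisfy
--
--     x_i >= 0 for i = 0,...,n-1                           (1)
--     a_0 x_0 + a_1 x_1 + ... + a_{n-1} x_{n-1} <= b       (2)
--
--     INPUT:
--     a: list of length n contaings ints or floats >0
--     b: int or float >= 0
--
--     OUTPUT:
--     sln: list length num_sln where num_sln is the number of solutions of (1)-(2)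
--          Each element of the is a tuple (x,s) where s = <a,x>
--     """
--     n = len(a)
--     imax = math.floor(b/a[0])
--     E = [ ( [i] , i*a[0] ) for i in range(imax+1)]
--     for m in range(1,n):
--         Enew = []
--         for x,s in E:
--             imax = math.floor((b-s)/a[m])
--             Enew = Enew + [ ( x+[i] , s+a[m]*i ) for i in range(imax+1) ]
--         E = Enew
--     return E
-- ===== SOURCE B (Python) =====
-- import math
--
-- def solve_int_ineq(a, b):
--     """Depth-first backtracking over coordinates instead of breadth-first
--     level rebuilding; emits solutions into one accumulator list in the same
--     lexicographic order."""
--     n = len(a)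
--     out = []
--
--     def rec(m, x, s):
--         if m == n:
--             out.append((x, s))
--             return
--         am = a[m]
--         top = math.floor((b - s) / am)
--         for i in range(top + 1):
--             rec(m + 1, x + [i], s + am * i)
--
--     rec(0, [], 0)
--     return out
-- ===== Notes on version B (the rewrite author's own statement) =====
-- stated objective: alternative
-- what changed: Replaces the breadth-first level-by-level rebuild (Enew = Enew + [...] per prefix) with a depth-first recursive backtracking that appends finished tuples to a single accumulator in the same lexicographic order.
-- outside the precondition, e.g. on solve_int_ineq([1, 0], -1): A returns [], B returns []
import Mathlib
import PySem

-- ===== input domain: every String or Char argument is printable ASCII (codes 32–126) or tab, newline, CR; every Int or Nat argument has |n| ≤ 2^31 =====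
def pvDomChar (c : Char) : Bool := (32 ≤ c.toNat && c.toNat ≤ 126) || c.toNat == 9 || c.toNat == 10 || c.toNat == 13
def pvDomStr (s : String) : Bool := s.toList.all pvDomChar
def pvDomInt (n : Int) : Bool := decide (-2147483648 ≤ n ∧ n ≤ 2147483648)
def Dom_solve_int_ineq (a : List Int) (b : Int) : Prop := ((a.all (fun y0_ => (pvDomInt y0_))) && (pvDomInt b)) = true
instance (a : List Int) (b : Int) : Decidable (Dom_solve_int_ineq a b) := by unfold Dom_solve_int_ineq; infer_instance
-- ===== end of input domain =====

-- B replaces A's breadth-first level rebuilding with depth-first recursive backtracking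
-- emitting the same tuples in the same lexicographic order (objective: alternative).

-- ===== PORT A =====
-- A's inner loop 'Enew = []; for x,s in E: Enew = Enew + [...]' as a helper
def pvStepA (a : List Int) (b : Int) (E : List (List Int × Int)) (m : Int) : List (List Int × Int) :=
  E.foldl (fun Enew xs =>
    Enew ++ (PySem.List.pyRange 0 (PySem.Int.floordiv (b - xs.2) (PySem.List.pyGetD a m 0) + 1) 1).map
      (fun i => (xs.1 ++ [i], xs.2 + PySem.List.pyGetD a m 0 * i))) []

def solve_int_ineq (a : List Int) (b : Int) : List (List Int × Int) :=
  let n : Int := (a.length : Int)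
  let imax := PySem.Int.floordiv b (PySem.List.pyGetD a 0 0)
  let E := (PySem.List.pyRange 0 (imax + 1) 1).map (fun i => ([i], i * PySem.List.pyGetD a 0 0))
  (PySem.List.pyRange 1 n 1).foldl (pvStepA a b) E

-- ===== PORT B =====
-- B's rec(m, x, s); Python tests 'm == n', and every call has m ≤ n, so the
-- guard 'n ≤ m' below tests the same thing (and gives termination).
def pvRecB (a : List Int) (b : Int) (m : Nat) (x : List Int) (s : Int) : List (List Int × Int) :=
  if a.length ≤ m then [(x, s)]
  else
    let am := PySem.List.pyGetD a (m : Int) 0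
    let top := PySem.Int.floordiv (b - s) am
    (PySem.List.pyRange 0 (top + 1) 1).flatMap (fun i => pvRecB a b (m + 1) (x ++ [i]) (s + am * i))
termination_by a.length - m
decreasing_by omega

def solve_int_ineq_alt (a : List Int) (b : Int) : List (List Int × Int) :=
  pvRecB a b 0 [] 0

-- ===== PRECONDITION & SPEC =====
-- Pre_ excludes empty a (Python A raises IndexError on a[0]) and any a containing 0
-- (Python raises ZeroDivisionError when that coefficient is reached; on inputs where
-- a zero coefficient is never reached because the candidate set is already empty,
-- both programs return []).
def Pre_solve_int_ineq (a : List Int) (b : Int) : Prop := a ≠ [] ∧ ∀ x ∈ a, x ≠ 0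
instance (a : List Int) (b : Int) : Decidable (Pre_solve_int_ineq a b) := by unfold Pre_solve_int_ineq; infer_instance

def pvWitness_solve_int_ineq : List Int × Int := ([2, 3], 7)

def Spec_solve_int_ineq (a : List Int) (b : Int) (out : List (List Int × Int)) : Prop := out = solve_int_ineq_alt a b
instance (a : List Int) (b : Int) (out : List (List Int × Int)) : Decidable (Spec_solve_int_ineq a b out) := by unfold Spec_solve_int_ineq; infer_instance

-- ===== CLAIM (what is proved, stated in full; the proofs are below) =====
def Claim_equal_solve_int_ineq : Prop := ∀ (a : List Int) (b : Int), Dom_solve_int_ineq a b → Pre_solve_int_ineq a b → Spec_solve_int_ineq a b (solve_int_ineq a b)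

-- ===== LEMMAS AND PROOFS =====

-- expansion of one prefix at level m (the list comprehension inside A's inner loop)
def pvExpand (a : List Int) (b : Int) (m : Int) (xs : List Int × Int) : List (List Int × Int) :=
  (PySem.List.pyRange 0 (PySem.Int.floordiv (b - xs.2) (PySem.List.pyGetD a m 0) + 1) 1).map
    (fun i => (xs.1 ++ [i], xs.2 + PySem.List.pyGetD a m 0 * i))

theorem pvStepA_eq_flatMap (a : List Int) (b : Int) (E : List (List Int × Int)) (m : Int) :
    pvStepA a b E m = E.flatMap (pvExpand a b m) := by
  unfold pvStepA pvExpand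
  simpa using PySem.List.foldl_append_eq_flatMap (pvExpand a b m) E ([])

-- foldl of pvStepA is a list homomorphism in the accumulator
theorem pvFoldl_hom (a : List Int) (b : Int) (L : List Int) (E : List (List Int × Int)) :
    L.foldl (pvStepA a b) E = E.flatMap (fun e => L.foldl (pvStepA a b) [e]) := by
  induction L generalizing E with
  | nil => simp
  | cons m L ih =>
    simp only [List.foldl_cons]
    rw [ih, pvStepA_eq_flatMap a b E m, List.flatMap_assoc]
    congr 1
    funext e
    rw [ih, pvStepA_eq_flatMap]
    simp [pvExpand]

-- B's recursion from level m equals A's remaining levels applied to the singleton [(x,s)]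
theorem pvRecB_eq (a : List Int) (b : Int) :
    ∀ (k m : Nat) (x : List Int) (s : Int), a.length - m = k → m ≤ a.length →
      pvRecB a b m x s = (PySem.List.pyRange (m : Int) (a.length : Int) 1).foldl (pvStepA a b) [(x, s)] := by
  intro k
  induction k with
  | zero =>
    intro m x s hk hm
    have hm' : a.length ≤ m := by omega
    have hle : (a.length : Int) ≤ (m : Int) := by exact_mod_cast hm'
    rw [pvRecB, if_pos hm', PySem.List.pyRange_one_eq_nil hle]
    rfl
  | succ k ih =>
    intro m x s hk hm
    have hlt : m < a.length := by omega
    rw [pvRecB, if_neg (by omega)]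
    rw [PySem.List.pyRange_one_cons (by exact_mod_cast hlt), List.foldl_cons]
    have hstep : pvStepA a b [(x, s)] (m : Int) = pvExpand a b (m : Int) (x, s) := by
      rw [pvStepA_eq_flatMap]; simp
    rw [hstep]
    have hcast : ((m : Int) + 1) = ((m + 1 : Nat) : Int) := by push_cast; ring
    rw [hcast, pvFoldl_hom]
    unfold pvExpand
    rw [List.flatMap_map]
    simp only []
    congr 1
    funext i
    exact ih (m + 1) (x ++ [i]) (s + PySem.List.pyGetD a (m : Int) 0 * i) (by omega) (by omega)

-- ===== VERDICT (by name: the statement is the Claim_ definition above) =====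
theorem solve_int_ineq_spec : Claim_equal_solve_int_ineq := by
  intro a b _ hpre
  unfold Spec_solve_int_ineq solve_int_ineq solve_int_ineq_alt
  have hlen : 0 < a.length := List.length_pos_iff.mpr hpre.1
  rw [pvRecB_eq a b (a.length) 0 [] 0 (by omega) (by omega)]
  rw [PySem.List.pyRange_one_cons (by exact_mod_cast hlen), List.foldl_cons]
  have hstep : pvStepA a b [([], 0)] 0 = pvExpand a b 0 ([], 0) := by
    rw [pvStepA_eq_flatMap]; simp
  rw [show ((0 : Nat) : Int) = (0 : Int) from rfl, hstep]
  unfold pvExpand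
  simp [Int.mul_comm]
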